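-- pv_equiv track=rewrite | github.com/smadhu247/CS-115 | hw9.py | num_matches
-- ===== SOURCE A (Python) =====
-- def num_matches(L1, L2):
--     '''Takes in two SORTED lists and returns the number of matching elements
--     between the two lists.'''
--     L1.sort()
--     L2.sort()
--     matches = 0
--     i = 0
--     j = 0
--     while i < len(L1) and j < len(L2):
--         if L1[i] == L2[j]:
--             matches += 1
--             i += 1
--             j += 1
--         elif L1[i] < L2[j]:
--             i += 1
--         else:
--             j += 1
--     return matches
-- ===== SOURCE B (Python) =====
-- def num_matches(L1, L2):
--     '''Takes in two SORTED lists and returns the number of matching elements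
--     between the two lists.'''
--     L1.sort()
--     L2.sort()
--     c1 = {}
--     for x in L1:
--         c1[x] = c1.get(x, 0) + 1
--     c2 = {}
--     for x in L2:
--         c2[x] = c2.get(x, 0) + 1
--     return sum(min(v, c2.get(k, 0)) for k, v in c1.items())
-- ===== Notes on version B (the rewrite author's own statement) =====
-- stated objective: alternative
-- what changed: Replaces the two-pointer merge scan over the sorted lists with a hash-based multiset intersection: build a count dict for each list and sum the per-value minimum counts (the in-place sorts are kept only to preserve A's argument mutation).
import Mathlib
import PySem

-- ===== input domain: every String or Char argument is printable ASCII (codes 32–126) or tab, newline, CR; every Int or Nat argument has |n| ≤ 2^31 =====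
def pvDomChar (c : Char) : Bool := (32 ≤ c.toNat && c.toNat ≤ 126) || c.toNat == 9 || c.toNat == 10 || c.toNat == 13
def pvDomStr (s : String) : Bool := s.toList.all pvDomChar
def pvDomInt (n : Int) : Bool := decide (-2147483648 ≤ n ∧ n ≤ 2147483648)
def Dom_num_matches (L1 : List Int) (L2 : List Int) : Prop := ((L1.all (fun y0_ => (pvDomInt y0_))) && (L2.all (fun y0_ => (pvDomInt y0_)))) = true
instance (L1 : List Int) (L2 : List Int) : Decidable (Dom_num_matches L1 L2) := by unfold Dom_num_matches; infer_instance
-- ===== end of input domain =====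

-- B replaces A's two-pointer merge scan with a hash-count (dict) multiset intersection;
-- both sort their arguments in place (observable mutation is identical); equivalence proved is about the RETURN value.

-- ===== PORT A =====
-- the while loop over indices i, j: each iteration advances i, j or both, so it is
-- the following recursion on the two (suffix) lists, accumulating `matches` as `1 +`.
def nmLoop : List Int → List Int → Int
  | a :: as, b :: bs =>
      if a = b then 1 + nmLoop as bs
      else if a < b then nmLoop as (b :: bs)
      else nmLoop (a :: as) bs
  | _, _ => 0
  termination_by xs ys => xs.length + ys.length

def num_matches (L1 : List Int) (L2 : List Int) : Int :=
  nmLoop (PySem.List.sorted L1 (fun x => x) false) (PySem.List.sorted L2 (fun x => x) false)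

-- ===== PORT B =====
-- Source B: sort both in place, build dict counters c1, c2 with get-default loops,
-- then sum(min(v, c2.get(k, 0)) for k, v in c1.items()).
def num_matches_alt (L1 : List Int) (L2 : List Int) : Int :=
  let s1 := PySem.List.sorted L1 (fun x => x) false
  let s2 := PySem.List.sorted L2 (fun x => x) false
  let c1 := s1.foldl (fun d x => d.insert x (d.getD x 0 + 1)) (PySem.Dict.empty : PySem.Dict Int Int)
  let c2 := s2.foldl (fun d x => d.insert x (d.getD x 0 + 1)) (PySem.Dict.empty : PySem.Dict Int Int)
  c1.items.foldl (fun acc kv => acc + min kv.2 (c2.getD kv.1 0)) 0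

-- ===== PRECONDITION & SPEC =====
def Spec_num_matches (L1 : List Int) (L2 : List Int) (out : Int) : Prop := out = num_matches_alt L1 L2
instance (L1 : List Int) (L2 : List Int) (out : Int) : Decidable (Spec_num_matches L1 L2 out) := by unfold Spec_num_matches; infer_instance

-- ===== CLAIM (what is proved, stated in full; the proofs are below) =====
def Claim_equal_num_matches : Prop := ∀ (L1 : List Int) (L2 : List Int), Dom_num_matches L1 L2 → Spec_num_matches L1 L2 (num_matches L1 L2)

-- ===== LEMMAS AND PROOFS =====

-- The two-pointer scan on sorted lists computes the multiset-intersection size.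
theorem nmLoop_eq_inter (xs ys : List Int) (hx : xs.Pairwise (· ≤ ·)) (hy : ys.Pairwise (· ≤ ·)) :
    nmLoop xs ys = ((Multiset.card ((xs : Multiset Int) ∩ (ys : Multiset Int)) : Nat) : Int) := by
  induction xs, ys using nmLoop.induct with
  | case1 as b bs ih =>
      rw [nmLoop, if_pos rfl]
      have hmem : b ∈ (b ::ₘ (bs : Multiset Int)) := Multiset.mem_cons_self b _
      rw [show ((b :: as : List Int) : Multiset Int) = b ::ₘ (as : Multiset Int) from rfl,
          show ((b :: bs : List Int) : Multiset Int) = b ::ₘ (bs : Multiset Int) from rfl,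
          Multiset.cons_inter_of_pos _ hmem, Multiset.erase_cons_head,
          Multiset.card_cons, ih hx.tail hy.tail]
      push_cast; ring
  | case2 a as b bs hne hlt ih =>
      rw [nmLoop]
      simp only [if_neg hne, if_pos hlt]
      have hnot : a ∉ ((b :: bs : List Int) : Multiset Int) := by
        intro hmem
        rcases List.mem_cons.mp (by exact_mod_cast hmem) with h | h
        · omega
        · have := (List.pairwise_cons.mp hy).1 _ h; omega
      rw [show ((a :: as : List Int) : Multiset Int) = a ::ₘ (as : Multiset Int) from rfl,
          Multiset.cons_inter_of_neg _ hnot, ih hx.tail hy]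
  | case3 a as b bs hne hnlt ih =>
      rw [nmLoop]
      simp only [if_neg hne, if_neg hnlt]
      have hblt : b < a := by omega
      have hnot : b ∉ ((a :: as : List Int) : Multiset Int) := by
        intro hmem
        rcases List.mem_cons.mp (by exact_mod_cast hmem) with h | h
        · omega
        · have := (List.pairwise_cons.mp hx).1 _ h; omega
      rw [show ((b :: bs : List Int) : Multiset Int) = b ::ₘ (bs : Multiset Int) from rfl,
          Multiset.inter_comm, Multiset.cons_inter_of_neg _ hnot, Multiset.inter_comm,
          ih hx hy.tail]
  | case4 xs ys h =>
      cases xs with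
      | nil => simp [nmLoop]
      | cons a as =>
          cases ys with
          | nil => simp [nmLoop]
          | cons b bs => exact (h a as b bs rfl rfl).elim

-- accumulator fold of `+ f` over a list is the sum of the mapped list
theorem foldl_add_f (l : List Int) (f : Int → Int) (a : Int) :
    l.foldl (fun acc k => acc + f k) a = a + (l.map f).sum := by
  induction l generalizing a with
  | nil => simp
  | cons x t ih => simp [List.foldl, ih]; ring

-- B's sum of min-counts over the distinct elements is the multiset-intersection size.
theorem sum_min_counts_eq_inter (xs ys : List Int) :
    ((PySem.Set.ofList xs : List Int).map (fun k => min ((xs.count k : Int)) ((ys.count k : Int)))).sum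
      = ((Multiset.card ((xs : Multiset Int) ∩ (ys : Multiset Int)) : Nat) : Int) := by
  have hcard : Multiset.card ((xs : Multiset Int) ∩ (ys : Multiset Int))
      = ∑ a ∈ xs.toFinset, min (xs.count a) (ys.count a) := by
    rw [← Multiset.toFinset_sum_count_eq]
    rw [Finset.sum_subset
      (by intro a ha
          have := Multiset.mem_toFinset.mp ha
          exact List.mem_toFinset.mpr (by exact_mod_cast (Multiset.mem_inter.mp this).1))
      (by intro a _ ha
          exact Multiset.count_eq_zero.mpr (fun h => ha (Multiset.mem_toFinset.mpr h)))]
    apply Finset.sum_congr rfl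
    intro a _
    rw [Multiset.count_inter]
    simp
  have hnodup : (PySem.Set.ofList xs : List Int).Nodup := PySem.Set.nodup_ofList xs
  have hfin : (PySem.Set.ofList xs : List Int).toFinset = xs.toFinset := by
    ext a
    simp [List.mem_toFinset, PySem.Set.mem_ofList]
  have hsum : ((PySem.Set.ofList xs : List Int).map
        (fun k => min ((xs.count k : Nat)) ((ys.count k : Nat)))).sum
      = ∑ a ∈ xs.toFinset, min (xs.count a) (ys.count a) := by
    rw [← List.sum_toFinset _ hnodup, hfin]
  rw [hcard, ← hsum]
  push_cast
  congr 1
  rw [List.map_map]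
  apply List.map_congr_left
  intro a _
  simp [Nat.cast_min]

-- ===== VERDICT (by name: the statement is the Claim_ definition above) =====
theorem num_matches_spec : Claim_equal_num_matches := by
  intro L1 L2 _
  unfold Spec_num_matches num_matches
  simp only [num_matches_alt]
  set s1 := PySem.List.sorted L1 (fun x => x) false with hs1
  set s2 := PySem.List.sorted L2 (fun x => x) false with hs2
  rw [PySem.Dict.foldl_insert_getD_add_one_eq_counter, PySem.Dict.foldl_insert_getD_add_one_eq_counter,
      PySem.Dict.items_counter]
  rw [List.foldl_map, nmLoop_eq_inter s1 s2 (PySem.List.sorted_pairwise L1 (fun x => x)) (PySem.List.sorted_pairwise L2 (fun x => x))]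
  rw [show (fun (acc : Int) (k : Int) => acc + min ((s1.count k : Int)) ((PySem.Dict.counter s2).getD k 0))
        = (fun acc k => acc + min ((s1.count k : Int)) ((s2.count k : Int))) from by
      funext acc k; rw [PySem.Dict.getD_counter]]
  rw [foldl_add_f, zero_add]
  exact (sum_min_counts_eq_inter s1 s2).symm
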